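-- pv_equiv track=rewrite | github.com/Nastemko/predictingthepast_exp | predictingthepast/util/eval.py | replace_mask_idx_with_unk
-- ===== SOURCE A (Python) =====
-- def replace_mask_idx_with_unk(text, mask_idx, missing_unk='_'):
--   """Replaces the missing characters with unk missing characters."""
--   if not mask_idx:
--     return text
--   mask_unk = []
--
--   # Sort the mask index
--   mask_idx = mask_idx.copy()
--   mask_idx.sort()
--
--   # Convert text to a list for easier manipulation
--   text_list = list(text)
--
--   # Start with the first group
--   text_list[mask_idx[0]] = missing_unk
--   mask_unk.append(mask_idx[0])
--
--   # Expand to the rest of the list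
--   count_empty = 0
--   for i in range(1, len(mask_idx)):
--     if mask_idx[i] == mask_idx[i - 1] + 1:
--       text_list[mask_idx[i]] = ''
--       count_empty += 1
--     else:
--       text_list[mask_idx[i]] = missing_unk
--       mask_unk.append(mask_idx[i] - count_empty)
--
--   return ''.join(text_list), mask_unk
-- ===== SOURCE B (Python) =====
-- def replace_mask_idx_with_unk(text, mask_idx, missing_unk='_'):
--   """Replaces the missing characters with unk missing characters.
--
--   Run-grouping re-implementation: split the sorted indices into maximal runs
--   of consecutive positions first, then rewrite the text one run at a time."""
--   if not mask_idx:
--     return text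
--
--   # Phase 1: maximal runs of consecutive indices, split off the front.
--   def runs(s):
--     if not s:
--       return []
--     j = 1
--     while j < len(s) and s[j] == s[j - 1] + 1:
--       j += 1
--     return [s[:j]] + runs(s[j:])
--
--   # Phase 2: rewrite the text run by run.
--   text_list = list(text)
--   mask_unk = []
--   removed = 0
--   for run in runs(sorted(mask_idx)):
--     text_list[run[0]] = missing_unk
--     mask_unk.append(run[0] - removed)
--     for j in run[1:]:
--       text_list[j] = ''
--       removed += 1
--   return ''.join(text_list), mask_unk
-- ===== Notes on version B (the rewrite author's own statement) =====
-- stated objective: alternative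
-- what changed: A does one fused pass over the sorted indices keeping a count_empty offset; B first groups the sorted indices into maximal consecutive runs (recursive front-splitting) and then rewrites the text run by run with a running removed counter.
-- outside the precondition, e.g. on replace_mask_idx_with_unk('ab', [], '_'): A returns 'ab', B returns 'ab'
import Mathlib
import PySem

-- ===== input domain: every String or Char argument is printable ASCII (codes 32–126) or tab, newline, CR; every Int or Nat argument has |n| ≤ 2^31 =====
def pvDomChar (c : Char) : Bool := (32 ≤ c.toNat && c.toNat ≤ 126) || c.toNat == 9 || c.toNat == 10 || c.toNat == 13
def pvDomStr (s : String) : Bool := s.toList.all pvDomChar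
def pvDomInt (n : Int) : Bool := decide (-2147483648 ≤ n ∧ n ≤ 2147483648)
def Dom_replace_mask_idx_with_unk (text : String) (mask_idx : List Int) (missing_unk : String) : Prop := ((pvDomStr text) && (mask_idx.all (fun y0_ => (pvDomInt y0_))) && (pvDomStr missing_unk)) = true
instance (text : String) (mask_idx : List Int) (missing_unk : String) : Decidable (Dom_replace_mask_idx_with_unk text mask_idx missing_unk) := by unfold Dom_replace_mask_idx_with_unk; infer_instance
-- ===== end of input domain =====

-- B regroups the work: instead of A's single fused pass with a count_empty offset, B first
-- splits the sorted indices into maximal consecutive runs and then rewrites the text run by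
-- run ("alternative" decomposition, same cost).


-- ===== PORT A =====
-- A's loop 'for i in range(1, len(mask_idx))' over the sorted list, carried as a structural
-- recursion with the previous element and the state (text_list, mask_unk, count_empty).
def pvALoop (missing_unk : String) (prev : Int) : List Int → List String × List Int × Int → List String × List Int × Int
  | [], st => st
  | x :: xs, (tl, mu, c) =>
    if x = prev + 1 then
      pvALoop missing_unk x xs (PySem.List.pySetD tl x "", mu, c + 1)
    else
      pvALoop missing_unk x xs (PySem.List.pySetD tl x missing_unk, mu ++ [x - c], c)

def replace_mask_idx_with_unk (text : String) (mask_idx : List Int) (missing_unk : String) : String × List Int :=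
  if mask_idx = [] then (text, []) else   -- Python returns the bare string here (excluded by Pre_)
  match PySem.List.sorted mask_idx (fun x => x) false with
  | [] => (text, [])                      -- unreachable: sorted of a nonempty list is nonempty
  | h :: t =>
    -- text_list[mask_idx[0]] = missing_unk; mask_unk = [mask_idx[0]]
    let tl0 := PySem.List.pySetD (text.toList.map (fun c => String.ofList [c])) h missing_unk
    let st := pvALoop missing_unk h t (tl0, [h], 0)
    (PySem.Str.join "" st.1, st.2.1)

-- ===== PORT B =====
-- Source B's 'runs': the while loop scanning strictly consecutive successors of prev, returning
-- (consumed run tail, remainder).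
def pvTakeRun (prev : Int) : List Int → List Int × List Int
  | [] => ([], [])
  | x :: xs =>
    if x = prev + 1 then
      ((pvTakeRun x xs).1.cons x, (pvTakeRun x xs).2)
    else ([], x :: xs)

theorem pvTakeRun_rest_length (p : Int) (xs : List Int) : (pvTakeRun p xs).2.length ≤ xs.length := by
  induction xs generalizing p with
  | nil => simp [pvTakeRun]
  | cons x xs ih =>
    simp only [pvTakeRun]
    split
    · exact le_trans (ih x) (Nat.le_succ _)
    · simp

def pvRuns : List Int → List (List Int)
  | [] => []
  | x :: xs => (x :: (pvTakeRun x xs).1) :: pvRuns (pvTakeRun x xs).2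
termination_by xs => xs.length
decreasing_by simpa using Nat.lt_succ_of_le (pvTakeRun_rest_length x xs)

-- Source B's inner 'for j in run[1:]': blank each position, removed += 1
def pvEmptyTail (tl : List String) (removed : Int) : List Int → List String × Int
  | [] => (tl, removed)
  | j :: js => pvEmptyTail (PySem.List.pySetD tl j "") (removed + 1) js

-- Source B's outer 'for run in runs(...)'
def pvProcRuns (missing_unk : String) : List (List Int) → List String × List Int × Int → List String × List Int × Int
  | [], st => st
  | run :: rs, (tl, mu, removed) =>
    match run with
    | [] => pvProcRuns missing_unk rs (tl, mu, removed)   -- unreachable: runs are nonempty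
    | h :: t =>
      let tl1 := PySem.List.pySetD tl h missing_unk
      let p := pvEmptyTail tl1 removed t
      pvProcRuns missing_unk rs (p.1, mu ++ [h - removed], p.2)

def replace_mask_idx_with_unk_alt (text : String) (mask_idx : List Int) (missing_unk : String) : String × List Int :=
  if mask_idx = [] then (text, []) else   -- Python returns the bare string here (excluded by Pre_)
  let st := pvProcRuns missing_unk (pvRuns (PySem.List.sorted mask_idx (fun x => x) false))
              (text.toList.map (fun c => String.ofList [c]), [], 0)
  (PySem.Str.join "" st.1, st.2.1)

-- ===== PRECONDITION & SPEC =====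
-- Pre_ excludes (a) empty mask_idx, where A returns the bare string instead of a pair (not a
-- value of the declared return type), and (b) any index out of range of text, where A raises
-- IndexError (and B raises too).
def Pre_replace_mask_idx_with_unk (text : String) (mask_idx : List Int) (missing_unk : String) : Prop :=
  mask_idx ≠ [] ∧ ∀ i ∈ mask_idx, PySem.Raise.InRange text.toList.length i
instance (text : String) (mask_idx : List Int) (missing_unk : String) : Decidable (Pre_replace_mask_idx_with_unk text mask_idx missing_unk) := by unfold Pre_replace_mask_idx_with_unk; infer_instance

def pvWitness_replace_mask_idx_with_unk : String × List Int × String := ("abcdef", [4, 1, 2, -6], "_")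

def Spec_replace_mask_idx_with_unk (text : String) (mask_idx : List Int) (missing_unk : String) (out : String × List Int) : Prop := out = replace_mask_idx_with_unk_alt text mask_idx missing_unk
instance (text : String) (mask_idx : List Int) (missing_unk : String) (out : String × List Int) : Decidable (Spec_replace_mask_idx_with_unk text mask_idx missing_unk out) := by unfold Spec_replace_mask_idx_with_unk; infer_instance

-- ===== CLAIM (what is proved, stated in full; the proofs are below) =====
def Claim_equal_replace_mask_idx_with_unk : Prop := ∀ (text : String) (mask_idx : List Int) (missing_unk : String), Dom_replace_mask_idx_with_unk text mask_idx missing_unk → Pre_replace_mask_idx_with_unk text mask_idx missing_unk → Spec_replace_mask_idx_with_unk text mask_idx missing_unk (replace_mask_idx_with_unk text mask_idx missing_unk)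

-- ===== LEMMAS AND PROOFS =====

-- A's fused loop after prev equals: finish prev's run (blank the consecutive successors,
-- counting them), then process the remaining runs of the tail.
theorem pvALoop_eq_procRuns (missing_unk : String) (xs : List Int) : ∀ (p : Int) (tl : List String) (mu : List Int) (c : Int),
    pvALoop missing_unk p xs (tl, mu, c) =
      pvProcRuns missing_unk (pvRuns (pvTakeRun p xs).2)
        ((pvEmptyTail tl c (pvTakeRun p xs).1).1, mu, (pvEmptyTail tl c (pvTakeRun p xs).1).2) := by
  induction xs with
  | nil => intro p tl mu c; simp [pvALoop, pvTakeRun, pvRuns, pvProcRuns, pvEmptyTail]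
  | cons x xs ih =>
    intro p tl mu c
    by_cases h : x = p + 1
    · subst h
      simp only [pvALoop, pvTakeRun, if_true, pvEmptyTail]
      exact ih (p + 1) (PySem.List.pySetD tl (p + 1) "") mu (c + 1)
    · simp only [pvALoop, pvTakeRun, if_neg h, pvRuns, pvProcRuns, pvEmptyTail]
      exact ih x (PySem.List.pySetD tl x missing_unk) (mu ++ [x - c]) c

theorem replace_mask_eq (text : String) (mask_idx : List Int) (missing_unk : String) :
    replace_mask_idx_with_unk text mask_idx missing_unk = replace_mask_idx_with_unk_alt text mask_idx missing_unk := by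
  unfold replace_mask_idx_with_unk replace_mask_idx_with_unk_alt
  by_cases hm : mask_idx = []
  · simp [hm]
  · simp only [if_neg hm]
    rcases hs : PySem.List.sorted mask_idx (fun x => x) false with _ | ⟨h, t⟩
    · exact absurd ((PySem.List.sorted_eq_nil_iff mask_idx (fun x => x) false).mp hs) hm
    · simp only [pvRuns, pvProcRuns, pvALoop_eq_procRuns]
      norm_num

-- ===== VERDICT (by name: the statement is the Claim_ definition above) =====
theorem replace_mask_idx_with_unk_spec : Claim_equal_replace_mask_idx_with_unk := by
  intro text mask_idx missing_unk _ _
  unfold Spec_replace_mask_idx_with_unk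
  exact replace_mask_eq text mask_idx missing_unk
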